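-- pv_equiv track=rewrite | github.com/SiebeLeDe/CodeAdvent2025 | day5/main.py | determine_fresh_and_spoiled_ids
-- ===== SOURCE A (Python) =====
-- def determine_fresh_and_spoiled_ids(ranges: list[tuple[int, int]], individual_ids: list[int]) -> tuple[list[int], list[int]]:
--     """
--     Determines which individual IDs belong to fresh and spoiled food items based on the provided ranges.
--     Fresh food IDs fall within any of the speicified ranges, while spoiled food IDs do not.
--     """
--     fresh_ids: list[int] = []
--     spoiled_ids: list[int] = []
--
--     for id_ in individual_ids:
--         is_fresh = any(start <= id_ <= end for start, end in ranges)
--         if is_fresh: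
--             fresh_ids.append(id_)
--         else:
--             spoiled_ids.append(id_)
--
--     return fresh_ids, spoiled_ids
-- ===== SOURCE B (Python) =====
-- # Faster re-implementation: merge the ranges once (sort by start, coalesce
-- # overlapping/touching intervals), then binary-search each id over the merged
-- # interval starts instead of scanning every range per id.
--
-- def _bisect_right(a, x):
--     lo, hi = 0, len(a)
--     while lo < hi:
--         mid = (lo + hi) // 2
--         if x < a[mid]:
--             hi = mid
--         else:
--             lo = mid + 1
--     return lo
--
--
-- def determine_fresh_and_spoiled_ids(ranges: list[tuple[int, int]], individual_ids: list[int]) -> tuple[list[int], list[int]]: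
--     merged = []
--     for start, end in sorted(ranges, key=lambda r: r[0]):
--         if merged and start <= merged[-1][1]:
--             s0, e0 = merged[-1]
--             merged[-1] = (s0, max(e0, end))
--         else:
--             merged.append((start, end))
--     starts = [s for s, _ in merged]
--     ends = [e for _, e in merged]
--     fresh_ids = []
--     spoiled_ids = []
--     for id_ in individual_ids:
--         i = _bisect_right(starts, id_)
--         if i > 0 and id_ <= ends[i - 1]:
--             fresh_ids.append(id_)
--         else:
--             spoiled_ids.append(id_)
--     return fresh_ids, spoiled_ids
-- ===== Notes on version B (the rewrite author's own statement) =====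
-- stated objective: faster
-- what changed: Instead of scanning every range for each id, B sorts the ranges by start once, coalesces overlapping intervals, and decides each id with a binary search over the merged interval starts.
import Mathlib
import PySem

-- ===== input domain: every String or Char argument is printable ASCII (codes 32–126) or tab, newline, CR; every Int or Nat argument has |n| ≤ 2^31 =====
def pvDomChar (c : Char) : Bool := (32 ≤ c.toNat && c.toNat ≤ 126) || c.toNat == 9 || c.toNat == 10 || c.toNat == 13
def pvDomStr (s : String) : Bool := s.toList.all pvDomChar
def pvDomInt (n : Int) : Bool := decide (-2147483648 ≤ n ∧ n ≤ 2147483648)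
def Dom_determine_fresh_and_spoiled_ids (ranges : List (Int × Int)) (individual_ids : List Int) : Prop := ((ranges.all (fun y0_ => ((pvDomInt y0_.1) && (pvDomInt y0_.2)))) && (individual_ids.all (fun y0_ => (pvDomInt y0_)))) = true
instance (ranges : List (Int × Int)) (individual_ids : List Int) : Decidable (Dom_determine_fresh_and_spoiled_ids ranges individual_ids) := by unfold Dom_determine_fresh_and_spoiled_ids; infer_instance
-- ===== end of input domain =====

-- B merges the ranges once and binary-searches each id; equivalence of return values with A's per-id linear scan is proved for all inputs.

-- ===== PORT A =====
def determine_fresh_and_spoiled_ids (ranges : List (Int × Int)) (individual_ids : List Int) : List Int × List Int :=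
  individual_ids.foldl (fun p id_ =>
    let is_fresh := ranges.any (fun r => decide (r.1 ≤ id_) && decide (id_ ≤ r.2))
    if is_fresh then (p.1 ++ [id_], p.2) else (p.1, p.2 ++ [id_])) ([], [])

-- ===== PORT B =====
-- the merge loop of Source B; the accumulator keeps the merged list in reverse, so merged[-1] is the head
def pvStep (acc : List (Int × Int)) (r : Int × Int) : List (Int × Int) :=
  match acc with
  | [] => [r]
  | (s0, e0) :: rest => if r.1 ≤ e0 then (s0, max e0 r.2) :: rest else r :: (s0, e0) :: rest

-- Source B's per-id test: i = _bisect_right(starts, id_); i > 0 and id_ <= ends[i-1]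
def pvQuery (starts ends : List Int) (x : Int) : Bool :=
  let i := PySem.List.bisectRight starts x
  decide (0 < i) && ((ends[i-1]?).elim false (fun e => decide (x ≤ e)))

def determine_fresh_and_spoiled_ids_alt (ranges : List (Int × Int)) (individual_ids : List Int) : List Int × List Int :=
  let merged := ((PySem.List.sorted ranges (fun r => r.1) false).foldl pvStep []).reverse
  let starts := merged.map (fun r => r.1)
  let ends := merged.map (fun r => r.2)
  individual_ids.foldl (fun p id_ =>
    if pvQuery starts ends id_ then (p.1 ++ [id_], p.2) else (p.1, p.2 ++ [id_])) ([], [])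

-- ===== PRECONDITION & SPEC =====
def Spec_determine_fresh_and_spoiled_ids (ranges : List (Int × Int)) (individual_ids : List Int) (out : List Int × List Int) : Prop := out = determine_fresh_and_spoiled_ids_alt ranges individual_ids
instance (ranges : List (Int × Int)) (individual_ids : List Int) (out : List Int × List Int) : Decidable (Spec_determine_fresh_and_spoiled_ids ranges individual_ids out) := by unfold Spec_determine_fresh_and_spoiled_ids; infer_instance

-- ===== CLAIM (what is proved, stated in full; the proofs are below) =====
def Claim_equal_determine_fresh_and_spoiled_ids : Prop := ∀ (ranges : List (Int × Int)) (individual_ids : List Int), Dom_determine_fresh_and_spoiled_ids ranges individual_ids → Spec_determine_fresh_and_spoiled_ids ranges individual_ids (determine_fresh_and_spoiled_ids ranges individual_ids)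

-- ===== LEMMAS AND PROOFS =====

def pvCov (rs : List (Int × Int)) (x : Int) : Bool :=
  rs.any (fun r => decide (r.1 ≤ x) && decide (x ≤ r.2))

def pvGood (acc : List (Int × Int)) : Prop :=
  acc.Pairwise (fun a b => b.2 < a.1 ∧ b.1 ≤ a.1)

theorem pvMerge_loop (rem : List (Int × Int)) : ∀ (acc : List (Int × Int)),
    rem.Pairwise (fun a b => a.1 ≤ b.1) →
    (∀ a ∈ acc, ∀ r ∈ rem, a.1 ≤ r.1) →
    pvGood acc →
    pvGood (rem.foldl pvStep acc) ∧
      ∀ x, pvCov (rem.foldl pvStep acc) x = (pvCov acc x || pvCov rem x) := by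
  induction rem with
  | nil => intro acc _ _ hacc; exact ⟨hacc, fun x => by simp [pvCov]⟩
  | cons r rest ih =>
    intro acc hrem hsep hacc
    rw [List.pairwise_cons] at hrem
    obtain ⟨hr_rest, hrest⟩ := hrem
    have hstep : pvGood (pvStep acc r) ∧
        (∀ a ∈ pvStep acc r, ∀ r' ∈ rest, a.1 ≤ r'.1) ∧
        (∀ x, pvCov (pvStep acc r) x
          = (pvCov acc x || (decide (r.1 ≤ x) && decide (x ≤ r.2)))) := by
      match acc with
      | [] =>
        refine ⟨List.pairwise_singleton .., ?_, ?_⟩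
        · intro a ha r' hr'
          simp [pvStep] at ha
          subst ha; exact hr_rest r' hr'
        · intro x; simp [pvStep, pvCov]
      | (s0, e0) :: restA =>
        have hs0r : s0 ≤ r.1 := hsep (s0, e0) (by simp) r (by simp)
        rw [pvGood, List.pairwise_cons] at hacc
        obtain ⟨hhead, htail⟩ := hacc
        by_cases hre : r.1 ≤ e0
        · -- merge case
          simp only [pvStep, if_pos hre]
          refine ⟨?_, ?_, ?_⟩
          · rw [pvGood, List.pairwise_cons]
            exact ⟨fun b hb => hhead b hb, htail⟩
          · intro a ha r' hr'
            rcases List.mem_cons.mp ha with h | h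
            · subst h; exact le_trans hs0r (hr_rest r' hr')
            · exact hsep a (List.mem_cons_of_mem _ h) r' (List.mem_cons_of_mem _ hr')
          · intro x
            simp only [pvCov, List.any_cons]
            have key : ∀ (b : Bool),
                ((decide (s0 ≤ x) && decide (x ≤ max e0 r.2)) || b)
                = (((decide (s0 ≤ x) && decide (x ≤ e0)) || b)
                   || (decide (r.1 ≤ x) && decide (x ≤ r.2))) := by
              intro b
              cases b
              · rw [Bool.eq_iff_iff]
                simp only [Bool.or_false, Bool.or_eq_true, Bool.and_eq_true, decide_eq_true_eq]
                omega
              · simp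
            exact key _
        · -- append case
          rw [not_le] at hre
          simp only [pvStep, if_neg (by omega : ¬ r.1 ≤ e0)]
          refine ⟨?_, ?_, ?_⟩
          · rw [pvGood, List.pairwise_cons]
            refine ⟨?_, by rw [List.pairwise_cons]; exact ⟨hhead, htail⟩⟩
            intro b hb
            rcases List.mem_cons.mp hb with h | h
            · subst h; exact ⟨hre, hs0r⟩
            · have := hhead b h; dsimp only at this; exact ⟨by omega, by omega⟩
          · intro a ha r' hr'
            rcases List.mem_cons.mp ha with h | h
            · subst h; exact hr_rest r' hr'
            · exact hsep a h r' (List.mem_cons_of_mem _ hr')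
          · intro x
            simp only [pvCov, List.any_cons]
            cases hb : (restA.any fun r => decide (r.1 ≤ x) && decide (x ≤ r.2)) <;> simp [Bool.or_comm]
    obtain ⟨hg', hs', hc'⟩ := hstep
    obtain ⟨hg, hc⟩ := ih (pvStep acc r) hrest hs' hg'
    refine ⟨by simpa using hg, ?_⟩
    intro x
    have : (r :: rest).foldl pvStep acc = rest.foldl pvStep (pvStep acc r) := by simp
    rw [this, hc x, hc' x]
    simp only [pvCov, List.any_cons]
    cases (decide (r.1 ≤ x) && decide (x ≤ r.2)) <;> simp

theorem pvQuery_eq (merged : List (Int × Int))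
    (h : merged.Pairwise (fun a b => a.2 < b.1 ∧ a.1 ≤ b.1)) (x : Int) :
    pvQuery (merged.map (fun r => r.1)) (merged.map (fun r => r.2)) x = pvCov merged x := by
  have hs : (merged.map (fun r => r.1)).Pairwise (fun a b => a ≤ b) :=
    (List.pairwise_map).mpr (h.imp (fun hab => hab.2))
  obtain ⟨hlen, hlt, hge⟩ := PySem.List.bisectRight_spec (merged.map (fun r => r.1)) x hs
  have hidx := List.pairwise_iff_getElem.mp h
  rw [List.length_map] at hlen
  by_cases hz : PySem.List.bisectRight (merged.map (fun r => r.1)) x = 0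
  · have hRHS : pvQuery (merged.map (fun r => r.1)) (merged.map (fun r => r.2)) x = false := by
      simp [pvQuery, hz]
    rw [hRHS]
    symm
    simp only [pvCov]
    rw [List.any_eq_false]
    intro r hr
    obtain ⟨j, hj, rfl⟩ := List.getElem_of_mem hr
    have hx := hge j (by simpa using hj) (by omega)
    simp only [List.getElem_map] at hx
    simp only [Bool.and_eq_true, decide_eq_true_eq, not_and]
    intro h1; omega
  · obtain ⟨k, hk⟩ : ∃ k, PySem.List.bisectRight (merged.map (fun r => r.1)) x = k + 1 :=
      ⟨_, (Nat.succ_pred_eq_of_pos (Nat.pos_of_ne_zero hz)).symm⟩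
    have hklen : k < merged.length := by omega
    have hsk : (merged[k]'hklen).1 ≤ x := by
      have := hlt k (by simpa using hklen) (by omega)
      simpa using this
    have hRHS : pvQuery (merged.map (fun r => r.1)) (merged.map (fun r => r.2)) x
        = decide (x ≤ (merged[k]'hklen).2) := by
      simp only [pvQuery, hk, Nat.add_sub_cancel]
      rw [List.getElem?_map, List.getElem?_eq_getElem hklen]
      simp
    rw [hRHS]
    by_cases hxe : x ≤ (merged[k]'hklen).2
    · rw [decide_eq_true hxe]
      symm
      simp only [pvCov, List.any_eq_true]
      refine ⟨merged[k]'hklen, List.getElem_mem _, ?_⟩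
      simp only [Bool.and_eq_true, decide_eq_true_eq]
      exact ⟨hsk, hxe⟩
    · rw [decide_eq_false hxe]
      symm
      simp only [pvCov]
      rw [List.any_eq_false]
      intro r hr
      obtain ⟨j, hj, rfl⟩ := List.getElem_of_mem hr
      simp only [Bool.and_eq_true, decide_eq_true_eq, not_and]
      intro h1
      by_cases hji : j < k + 1
      · rcases Nat.lt_or_ge j k with hjk | hjk
        · have h2 := (hidx j k hj hklen hjk).1
          omega
        · have hjke : j = k := by omega
          subst hjke
          intro h2; exact hxe h2
      · have hx := hge j (by simpa using hj) (by omega)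
        simp only [List.getElem_map] at hx
        omega

-- ===== VERDICT (by name: the statement is the Claim_ definition above) =====
theorem determine_fresh_and_spoiled_ids_spec : Claim_equal_determine_fresh_and_spoiled_ids := by
  intro ranges individual_ids _
  unfold Spec_determine_fresh_and_spoiled_ids determine_fresh_and_spoiled_ids determine_fresh_and_spoiled_ids_alt
  have hsorted := PySem.List.sorted_pairwise (xs := ranges) (key := fun r => r.1)
  obtain ⟨hgood, hcov⟩ := pvMerge_loop (PySem.List.sorted ranges (fun r => r.1) false) [] hsorted
    (by intro a ha; cases ha) (by constructor)
  set merged := ((PySem.List.sorted ranges (fun r => r.1) false).foldl pvStep []).reverse with hm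
  have hQ : merged.Pairwise (fun a b => a.2 < b.1 ∧ a.1 ≤ b.1) := by
    rw [hm, List.pairwise_reverse]; exact hgood
  have hpoint : ∀ x, pvQuery (merged.map (fun r => r.1)) (merged.map (fun r => r.2)) x
      = ranges.any (fun r => decide (r.1 ≤ x) && decide (x ≤ r.2)) := by
    intro x
    rw [pvQuery_eq merged hQ x]
    have h1 : pvCov merged x = pvCov ((PySem.List.sorted ranges (fun r => r.1) false).foldl pvStep []) x := by
      rw [hm]; unfold pvCov; exact List.any_reverse ..
    rw [h1, hcov x]
    have h2 : pvCov (PySem.List.sorted ranges (fun r => r.1) false) x = pvCov ranges x := by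
      unfold pvCov
      exact (PySem.List.sorted_perm (xs := ranges) (key := fun r => r.1) (rev := false)).any_eq
    simp [pvCov] at h2 ⊢
    rw [h2]
  have hfun : (fun (p : List Int × List Int) id_ =>
      if pvQuery (merged.map (fun r => r.1)) (merged.map (fun r => r.2)) id_ then (p.1 ++ [id_], p.2) else (p.1, p.2 ++ [id_]))
      = (fun (p : List Int × List Int) id_ =>
      let is_fresh := ranges.any (fun r => decide (r.1 ≤ id_) && decide (id_ ≤ r.2))
      if is_fresh then (p.1 ++ [id_], p.2) else (p.1, p.2 ++ [id_])) := by
    funext p id_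
    rw [hpoint id_]
  show individual_ids.foldl (fun p id_ =>
      let is_fresh := ranges.any (fun r => decide (r.1 ≤ id_) && decide (id_ ≤ r.2))
      if is_fresh then (p.1 ++ [id_], p.2) else (p.1, p.2 ++ [id_])) ([], [])
    = individual_ids.foldl (fun p id_ =>
      if pvQuery (merged.map (fun r => r.1)) (merged.map (fun r => r.2)) id_ then (p.1 ++ [id_], p.2) else (p.1, p.2 ++ [id_])) ([], [])
  rw [hfun]
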